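-- pv_equiv track=rewrite | github.com/frenkowski/MSA_SARS-CoV-2 | findDifferences.py | findStats
-- ===== SOURCE A (Python) =====
-- def findStats(reference, alignments):
--     """
--         For each alignment, find its stats (no. of Matches, no. of Mismatches, no. of NAs)
--
--         :param reference:
--             A dict of the form {ref_id : reference}
--
--         :param alignments:
--             A dict of the form {align_id_1 : value, align_id_2 : value, etc.}
--
--         :returns:
--             A dict containing, for each alignment, all of its stats
--     """
--     # Initialize dict
--     stats = dict()
--     for align_id in alignments.keys():
--         stats[align_id] = dict()
--         stats[align_id]['matches'] = 0
--         stats[align_id]['mismatches'] = 0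
--         stats[align_id]['na'] = 0
--
--     # Extract reference from dict
--     ref_id = list(reference.keys())[0]
--     ref = reference[ref_id]
--
--     # Add entry in stats for reference
--     stats[ref_id] = dict()
--     stats[ref_id]['na'] = 0  # Count number of Ns
--
--     for i in range(0, len(ref)):
--         # Check if ref is Not Available
--         if ref[i] == 'N':
--             stats[ref_id]['na'] = stats[ref_id]['na'] + 1
--         # Check each alignment
--         for align_id in alignments.keys():
--             curr_base = alignments[align_id][i]
--             if curr_base == 'N':
--                 stats[align_id]['na'] = stats[align_id]['na'] + 1
--             elif curr_base == ref[i]: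
--                 stats[align_id]['matches'] = stats[align_id]['matches'] + 1
--             else:  # curr_base != ref[i]
--                 stats[align_id]['mismatches'] = stats[align_id]['mismatches'] + 1
--
--     return stats
-- ===== SOURCE B (Python) =====
-- def findStats(reference, alignments):
--     # Histogram approach: per alignment, build a frequency table of (ref_base, align_base)
--     # pairs in one pass, then derive matches/mismatches/na by classifying the distinct
--     # pair types once each (instead of classifying every position individually).
--     ref_id, ref = next(iter(reference.items()))
--     n = len(ref)
--     stats = {}
--     for align_id, seq in alignments.items():
--         pairs = {}
--         for i in range(n):
--             key = (ref[i], seq[i])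
--             pairs[key] = pairs.get(key, 0) + 1
--         matches = 0
--         mismatches = 0
--         na = 0
--         for (r, b), cnt in pairs.items():
--             if b == 'N':
--                 na += cnt
--             elif b == r:
--                 matches += cnt
--             else:
--                 mismatches += cnt
--         stats[align_id] = {'matches': matches, 'mismatches': mismatches, 'na': na}
--     na_ref = 0
--     for c in ref:
--         if c == 'N':
--             na_ref += 1
--     stats[ref_id] = {'na': na_ref}
--     return stats
-- ===== Notes on version B (the rewrite author's own statement) =====
-- stated objective: alternative
-- what changed: Replaces A's fused position-by-alignment loop over one shared mutable stats dict with a per-alignment frequency table of (ref_base, align_base) pairs, deriving matches/mismatches/na by classifying each distinct pair type once.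
-- outside the precondition, e.g. on findStats({'a': 'A'}, {'a': 'N'}): A returns {'a': {'na': 1}}, B returns {'a': {'na': 0}}
import Mathlib
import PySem

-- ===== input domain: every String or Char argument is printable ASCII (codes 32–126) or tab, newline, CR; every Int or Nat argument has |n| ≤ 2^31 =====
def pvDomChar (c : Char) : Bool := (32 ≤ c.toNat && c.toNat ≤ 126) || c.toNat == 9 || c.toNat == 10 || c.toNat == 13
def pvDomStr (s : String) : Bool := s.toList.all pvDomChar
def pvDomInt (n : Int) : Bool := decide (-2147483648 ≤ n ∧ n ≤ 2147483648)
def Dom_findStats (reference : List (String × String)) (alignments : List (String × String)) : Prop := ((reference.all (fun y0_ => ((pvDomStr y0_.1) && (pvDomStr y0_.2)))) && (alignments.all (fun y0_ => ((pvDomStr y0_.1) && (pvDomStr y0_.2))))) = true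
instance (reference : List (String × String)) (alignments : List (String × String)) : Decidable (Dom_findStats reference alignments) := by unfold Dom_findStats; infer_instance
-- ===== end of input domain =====

-- B replaces A's fused position-by-alignment loop over one shared mutable stats dict by a
-- per-alignment frequency table of (ref_base, align_base) pairs, then derives the three counts
-- by classifying each distinct pair type once (alternative decomposition, same asymptotic cost).

-- ===== PORT A =====
def findStats (reference : List (String × String)) (alignments : List (String × String)) : List (String × List (String × Int)) :=
  let refd := PySem.Dict.ofList reference
  let ald := PySem.Dict.ofList alignments
  -- stats[align_id] = dict(); stats[align_id]['matches'] = 0; ['mismatches'] = 0; ['na'] = 0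
  let stats : PySem.Dict String (PySem.Dict String Int) :=
    ald.keys.foldl (fun st k =>
        st.insert k (((PySem.Dict.empty.insert "matches" (0 : Int)).insert "mismatches" 0).insert "na" 0))
      PySem.Dict.empty
  -- ref_id = list(reference.keys())[0]  (IndexError on empty reference: excluded by Pre_)
  let rid := (PySem.List.pyGet? refd.keys 0).getD ""
  let ref := (refd.getD rid "").toList
  let stats := stats.insert rid (PySem.Dict.empty.insert "na" (0 : Int))
  let stats := (PySem.List.pyRange 0 (PySem.List.len ref) 1).foldl (fun st i =>
      let st := if PySem.List.pyGetD ref i ' ' = 'N'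
                then st.insert rid ((st.getD rid PySem.Dict.empty).insert "na"
                       ((st.getD rid PySem.Dict.empty).getD "na" 0 + 1))
                else st
      ald.keys.foldl (fun st k =>
        -- curr_base = alignments[align_id][i]  (IndexError on a short alignment: excluded by Pre_)
        let curr := PySem.List.pyGetD (ald.getD k "").toList i ' '
        if curr = 'N' then
          st.insert k ((st.getD k PySem.Dict.empty).insert "na" ((st.getD k PySem.Dict.empty).getD "na" 0 + 1))
        else if curr = PySem.List.pyGetD ref i ' ' then
          st.insert k ((st.getD k PySem.Dict.empty).insert "matches" ((st.getD k PySem.Dict.empty).getD "matches" 0 + 1))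
        else
          st.insert k ((st.getD k PySem.Dict.empty).insert "mismatches" ((st.getD k PySem.Dict.empty).getD "mismatches" 0 + 1))) st)
    stats
  stats.items.map (fun p => (p.1, p.2.items))

-- ===== PORT B =====
def findStats_alt (reference : List (String × String)) (alignments : List (String × String)) : List (String × List (String × Int)) :=
  let refd := PySem.Dict.ofList reference
  let ald := PySem.Dict.ofList alignments
  -- ref_id, ref = next(iter(reference.items()))  (StopIteration on empty reference: excluded by Pre_)
  let first := (PySem.List.pyGet? refd.items 0).getD ("", "")
  let rid := first.1
  let ref := first.2.toList
  let stats : PySem.Dict String (PySem.Dict String Int) :=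
    ald.items.foldl (fun st kv =>
        let seq := kv.2.toList
        -- pairs[key] = pairs.get(key, 0) + 1  over key = (ref[i], seq[i])
        -- (seq[i] raises IndexError on a short alignment: excluded by Pre_)
        let pairs : PySem.Dict (Char × Char) Int :=
          (PySem.List.pyRange 0 (PySem.List.len ref) 1).foldl (fun d i =>
            let key := (PySem.List.pyGetD ref i ' ', PySem.List.pyGetD seq i ' ')
            d.insert key (d.getD key 0 + 1)) PySem.Dict.empty
        -- classify each distinct pair type once
        let c := pairs.items.foldl (fun (c : Int × Int × Int) kv =>
            if kv.1.2 = 'N' then (c.1, c.2.1, c.2.2 + kv.2)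
            else if kv.1.2 = kv.1.1 then (c.1 + kv.2, c.2.1, c.2.2)
            else (c.1, c.2.1 + kv.2, c.2.2)) ((0, 0, 0) : Int × Int × Int)
        st.insert kv.1 (((PySem.Dict.empty.insert "matches" c.1).insert "mismatches" c.2.1).insert "na" c.2.2))
      PySem.Dict.empty
  let naRef := ref.foldl (fun (a : Int) ch => if ch = 'N' then a + 1 else a) 0
  let stats := stats.insert rid (PySem.Dict.empty.insert "na" naRef)
  stats.items.map (fun p => (p.1, p.2.items))

-- ===== PRECONDITION & SPEC =====
-- Pre_ excludes exactly: empty reference (A raises IndexError); an alignment value shorter than the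
-- reference (A raises IndexError); and a reference id that collides with an alignment id, where A
-- usually raises KeyError and otherwise its single shared stats dict accidentally merges the
-- reference entry with that alignment's entry — a dict-collision artefact nobody would specify.
def Pre_findStats (reference : List (String × String)) (alignments : List (String × String)) : Prop :=
  reference ≠ [] ∧
  (∀ p ∈ alignments, p.1 ≠ ((PySem.Dict.ofList reference).items.head?.getD ("", "")).1) ∧
  (∀ p ∈ (PySem.Dict.ofList alignments).items,
    ((PySem.Dict.ofList reference).items.head?.getD ("", "")).2.length ≤ p.2.length)
instance (reference : List (String × String)) (alignments : List (String × String)) : Decidable (Pre_findStats reference alignments) := by unfold Pre_findStats; infer_instance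

def pvWitness_findStats : (List (String × String)) × (List (String × String)) :=
  ([("ref", "ANG")], [("s1", "ANC"), ("s2", "NNGT")])

def Spec_findStats (reference : List (String × String)) (alignments : List (String × String)) (out : List (String × List (String × Int))) : Prop := out = findStats_alt reference alignments
instance (reference : List (String × String)) (alignments : List (String × String)) (out : List (String × List (String × Int))) : Decidable (Spec_findStats reference alignments out) := by unfold Spec_findStats; infer_instance

-- ===== CLAIM (what is proved, stated in full; the proofs are below) =====
def Claim_equal_findStats : Prop := ∀ (reference : List (String × String)) (alignments : List (String × String)), Dom_findStats reference alignments → Pre_findStats reference alignments → Spec_findStats reference alignments (findStats reference alignments)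

-- ===== LEMMAS AND PROOFS =====

-- the inner dict {'matches': m, 'mismatches': mm, 'na': na}
def pvRow (c : Int × Int × Int) : PySem.Dict String Int :=
  ((PySem.Dict.empty.insert "matches" c.1).insert "mismatches" c.2.1).insert "na" c.2.2

-- one position's classification of seq[i] against ref[i] (A's inner-loop body on one key)
def pvStep (ref seq : List Char) (i : Int) (c : Int × Int × Int) : Int × Int × Int :=
  let base := PySem.List.pyGetD seq i ' '
  if base = 'N' then (c.1, c.2.1, c.2.2 + 1)
  else if base = PySem.List.pyGetD ref i ' ' then (c.1 + 1, c.2.1, c.2.2)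
  else (c.1, c.2.1 + 1, c.2.2)

def pvCnt (ref seq : List Char) (t : Nat) : Int × Int × Int :=
  (PySem.List.pyRange 0 (t : Int) 1).foldl (fun c i => pvStep ref seq i c) (0, 0, 0)

def pvNa (l : List Char) : Int := l.foldl (fun (a : Int) ch => if ch = 'N' then a + 1 else a) 0

-- A's stats dict after the first t iterations of the position loop
def pvState (ald : PySem.Dict String String) (rid : String) (ref : List Char) (t : Nat) :
    PySem.Dict String (PySem.Dict String Int) :=
  PySem.Dict.mk (ald.items.map (fun kv => (kv.1, pvRow (pvCnt ref kv.2.toList t)))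
    ++ [(rid, PySem.Dict.empty.insert "na" (pvNa (ref.take t)))])

-- ===== histogram machinery for B =====

-- class of a (ref_base, align_base) pair as a (matches, mismatches, na) unit vector
def pvCls (k : Char × Char) : Int × Int × Int :=
  if k.2 = 'N' then (0, 0, 1) else if k.2 = k.1 then (1, 0, 0) else (0, 1, 0)

-- weight of one histogram entry
def pvW (kv : (Char × Char) × Int) : Int × Int × Int :=
  (kv.2 * (pvCls kv.1).1, kv.2 * (pvCls kv.1).2.1, kv.2 * (pvCls kv.1).2.2)

def pvSum : List ((Char × Char) × Int) → Int × Int × Int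
  | [] => (0, 0, 0)
  | kv :: l => let s := pvSum l; ((pvW kv).1 + s.1, (pvW kv).2.1 + s.2.1, (pvW kv).2.2 + s.2.2)

-- B's per-alignment histogram after the first t positions
def pvHist (ref seq : List Char) (t : Nat) : PySem.Dict (Char × Char) Int :=
  (PySem.List.pyRange 0 (t : Int) 1).foldl (fun d i =>
      let key := (PySem.List.pyGetD ref i ' ', PySem.List.pyGetD seq i ' ')
      d.insert key (d.getD key 0 + 1)) PySem.Dict.empty

-- ===== proof helpers =====

lemma pv_find?_eq_none {V : Type} (P : List (String × V)) (k : String)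
    (h : k ∉ P.map Prod.fst) : P.find? (fun p => p.1 == k) = none := by
  rw [List.find?_eq_none]
  intro p hp hbeq
  exact h (List.mem_map.mpr ⟨p, hp, by simpa using hbeq⟩)

lemma pv_getD_mk_append {V : Type} (P T : List (String × V)) (k : String) (d0 : V)
    (h : k ∉ P.map Prod.fst) :
    (PySem.Dict.mk (P ++ T)).getD k d0 = (PySem.Dict.mk T).getD k d0 := by
  simp [PySem.Dict.getD, PySem.Dict.get?, List.find?_append, pv_find?_eq_none P k h]

lemma pv_map_repl_id {K V : Type} [BEq K] [LawfulBEq K] (P : List (K × V)) (k : K) (v : V)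
    (h : k ∉ P.map Prod.fst) :
    P.map (fun p => if (p.1 == k) = true then (k, v) else p) = P := by
  rw [List.map_congr_left (g := id), List.map_id]
  intro p hp
  have : ¬ (p.1 == k) = true := by
    intro hb; exact h (List.mem_map.mpr ⟨p, hp, by simpa using hb⟩)
  simp [this]

lemma pv_insert_mk_append {V : Type} (P T : List (String × V)) (k : String) (v : V)
    (hP : k ∉ P.map Prod.fst) (hT : (PySem.Dict.mk T).contains k = true) :
    (PySem.Dict.mk (P ++ T)).insert k v
      = PySem.Dict.mk (P ++ (((PySem.Dict.mk T).insert k v).items)) := by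
  have hc : (PySem.Dict.mk (P ++ T)).contains k = true := by
    simp only [PySem.Dict.contains, List.any_append] at hT ⊢
    simp [hT]
  simp only [PySem.Dict.insert, hc, hT, if_pos, List.map_append,
    pv_map_repl_id P k v hP]

-- the pointwise per-key update fold: each key's entry is rewritten in place
lemma pv_foldl_pointwise (g : String → PySem.Dict String Int → PySem.Dict String Int) :
    ∀ (L P T : List (String × PySem.Dict String Int)),
      (L.map Prod.fst).Nodup →
      (∀ k ∈ L.map Prod.fst, k ∉ P.map Prod.fst) →
      (∀ k ∈ L.map Prod.fst, k ∉ T.map Prod.fst) →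
      (L.map Prod.fst).foldl
          (fun st k => st.insert k (g k (st.getD k PySem.Dict.empty)))
          (PySem.Dict.mk (P ++ L ++ T))
        = PySem.Dict.mk (P ++ L.map (fun p => (p.1, g p.1 p.2)) ++ T) := by
  intro L
  induction L with
  | nil => intro P T _ _ _; simp
  | cons p L' ih =>
    intro P T hnd hP hT
    have hnd' : (p.1 :: L'.map Prod.fst).Nodup := by simpa using hnd
    have hpP : p.1 ∉ P.map Prod.fst := hP p.1 (by simp)
    have hpL' : p.1 ∉ L'.map Prod.fst := (List.nodup_cons.mp hnd').1
    have hpT : p.1 ∉ T.map Prod.fst := hT p.1 (by simp)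
    have hget : (PySem.Dict.mk (P ++ (p :: L') ++ T)).getD p.1 PySem.Dict.empty = p.2 := by
      rw [List.append_assoc, pv_getD_mk_append _ _ _ _ hpP]
      simp [PySem.Dict.getD, PySem.Dict.get?]
    have hins : (PySem.Dict.mk (P ++ (p :: L') ++ T)).insert p.1 (g p.1 p.2)
        = PySem.Dict.mk ((P ++ [(p.1, g p.1 p.2)]) ++ L' ++ T) := by
      have hc : (PySem.Dict.mk ((p :: L') ++ T)).contains p.1 = true := by
        simp [PySem.Dict.contains]
      rw [List.append_assoc, pv_insert_mk_append _ _ _ _ hpP hc]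
      have hitems : ((PySem.Dict.mk ((p :: L') ++ T)).insert p.1 (g p.1 p.2)).items
          = (p.1, g p.1 p.2) :: (L' ++ T) := by
        rw [PySem.Dict.items_insert_of_contains _ _ hc]
        show ((p :: L') ++ T).map (fun q => if (q.1 == p.1) = true then (p.1, g p.1 p.2) else q)
            = (p.1, g p.1 p.2) :: (L' ++ T)
        rw [List.map_append, List.map_cons, pv_map_repl_id L' p.1 _ hpL',
          pv_map_repl_id T p.1 _ hpT]
        simp
      rw [hitems]
      simp
    calc ((p :: L').map Prod.fst).foldl
          (fun st k => st.insert k (g k (st.getD k PySem.Dict.empty)))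
          (PySem.Dict.mk (P ++ (p :: L') ++ T))
        = (L'.map Prod.fst).foldl
          (fun st k => st.insert k (g k (st.getD k PySem.Dict.empty)))
          (PySem.Dict.mk ((P ++ [(p.1, g p.1 p.2)]) ++ L' ++ T)) := by
          simp only [List.map_cons, List.foldl_cons, hget, hins]
      _ = PySem.Dict.mk ((P ++ [(p.1, g p.1 p.2)]) ++ L'.map (fun p => (p.1, g p.1 p.2)) ++ T) := by
          apply ih
          · exact (List.nodup_cons.mp hnd').2
          · intro k hk
            simp only [List.map_append, List.mem_append]
            rintro (h1 | h2)
            · exact hP k (by simp; right; simpa using hk) h1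
            · simp at h2
              subst h2
              exact hpL' hk
          · intro k hk; exact hT k (by simp; right; simpa using hk)
      _ = PySem.Dict.mk (P ++ (p :: L').map (fun p => (p.1, g p.1 p.2)) ++ T) := by
          simp

lemma pvRow_getD_matches (c : Int × Int × Int) : (pvRow c).getD "matches" 0 = c.1 := rfl
lemma pvRow_getD_mismatches (c : Int × Int × Int) : (pvRow c).getD "mismatches" 0 = c.2.1 := rfl
lemma pvRow_getD_na (c : Int × Int × Int) : (pvRow c).getD "na" 0 = c.2.2 := rfl
lemma pvRow_insert_matches (c : Int × Int × Int) (x : Int) :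
    (pvRow c).insert "matches" x = pvRow (x, c.2.1, c.2.2) := rfl
lemma pvRow_insert_mismatches (c : Int × Int × Int) (x : Int) :
    (pvRow c).insert "mismatches" x = pvRow (c.1, x, c.2.2) := rfl
lemma pvRow_insert_na (c : Int × Int × Int) (x : Int) :
    (pvRow c).insert "na" x = pvRow (c.1, c.2.1, x) := rfl

lemma pvCnt_zero (ref seq : List Char) : pvCnt ref seq 0 = (0, 0, 0) := rfl

lemma pvCnt_succ (ref seq : List Char) (t : Nat) :
    pvCnt ref seq (t + 1) = pvStep ref seq (t : Int) (pvCnt ref seq t) := by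
  unfold pvCnt
  have h : ((t + 1 : Nat) : Int) = (t : Int) + 1 := by push_cast; ring
  rw [h, PySem.List.pyRange_one_succ_right (by positivity), List.foldl_append]
  rfl

lemma pvNa_append_singleton (l : List Char) (c : Char) :
    pvNa (l ++ [c]) = if c = 'N' then pvNa l + 1 else pvNa l := by
  unfold pvNa
  rw [List.foldl_append]
  rfl

-- ===== histogram lemmas (B) =====

-- B's classification fold over an items list, started at c0, adds pvSum
lemma pvSum_cons (kv : (Char × Char) × Int) (l : List ((Char × Char) × Int)) :
    pvSum (kv :: l) = ((pvW kv).1 + (pvSum l).1, (pvW kv).2.1 + (pvSum l).2.1,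
      (pvW kv).2.2 + (pvSum l).2.2) := rfl

lemma pv_classify_foldl (l : List ((Char × Char) × Int)) :
    ∀ c0 : Int × Int × Int,
    l.foldl (fun (c : Int × Int × Int) kv =>
        if kv.1.2 = 'N' then (c.1, c.2.1, c.2.2 + kv.2)
        else if kv.1.2 = kv.1.1 then (c.1 + kv.2, c.2.1, c.2.2)
        else (c.1, c.2.1 + kv.2, c.2.2)) c0
      = (c0.1 + (pvSum l).1, c0.2.1 + (pvSum l).2.1, c0.2.2 + (pvSum l).2.2) := by
  induction l with
  | nil => intro c0; simp [pvSum]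
  | cons kv l ih =>
    intro c0
    rw [List.foldl_cons, ih, pvSum_cons]
    unfold pvW pvCls
    split_ifs <;> refine Prod.ext ?_ (Prod.ext ?_ ?_) <;> (try simp) <;> (try ring)

lemma pvSum_append_singleton (l : List ((Char × Char) × Int)) (x : (Char × Char) × Int) :
    pvSum (l ++ [x]) = ((pvSum l).1 + (pvW x).1, (pvSum l).2.1 + (pvW x).2.1,
      (pvSum l).2.2 + (pvW x).2.2) := by
  induction l with
  | nil => simp [pvSum]
  | cons kv l ih =>
    rw [List.cons_append, pvSum_cons, ih, pvSum_cons]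
    refine Prod.ext ?_ (Prod.ext ?_ ?_) <;> (try simp) <;> (try ring)

-- replacing the (unique) entry at key k by value+1 adds pvCls k to pvSum
lemma pvSum_replace (l : List ((Char × Char) × Int)) (k : Char × Char) (v : Int)
    (hnd : (l.map Prod.fst).Nodup) (hmem : (k, v) ∈ l) :
    pvSum (l.map (fun p => if (p.1 == k) = true then (k, v + 1) else p))
      = ((pvSum l).1 + (pvCls k).1, (pvSum l).2.1 + (pvCls k).2.1,
         (pvSum l).2.2 + (pvCls k).2.2) := by
  induction l with
  | nil => cases hmem
  | cons p l ih =>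
    rw [List.map_cons] at hnd
    have hnd0 := List.nodup_cons.mp hnd
    by_cases hpk : p.1 = k
    · have hp : p = (k, v) := by
        rcases List.mem_cons.mp hmem with h | h
        · exact h.symm
        · exact absurd (List.mem_map.mpr ⟨(k, v), h, rfl⟩) (hpk ▸ hnd0.1)
      subst hp
      rw [List.map_cons, if_pos (by simp), pv_map_repl_id l k (v + 1) hnd0.1,
        pvSum_cons, pvSum_cons]
      unfold pvW
      refine Prod.ext ?_ (Prod.ext ?_ ?_) <;> (try simp) <;> (try ring)
    · have hmem' : (k, v) ∈ l := by
        rcases List.mem_cons.mp hmem with h | h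
        · exact absurd (congrArg Prod.fst h.symm) hpk
        · exact h
      rw [List.map_cons, if_neg (by simpa using hpk), pvSum_cons,
        ih hnd0.2 hmem', pvSum_cons]
      refine Prod.ext ?_ (Prod.ext ?_ ?_) <;> (try simp) <;> (try ring)

lemma pvSum_insert_add_one (d : PySem.Dict (Char × Char) Int) (hnd : d.keys.Nodup)
    (k : Char × Char) :
    pvSum ((d.insert k (d.getD k 0 + 1)).items)
      = ((pvSum d.items).1 + (pvCls k).1, (pvSum d.items).2.1 + (pvCls k).2.1,
         (pvSum d.items).2.2 + (pvCls k).2.2) := by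
  by_cases hc : d.contains k = true
  · obtain ⟨v, hv⟩ : ∃ v, d.get? k = some v := by
      cases hg : d.get? k with
      | none => rw [PySem.Dict.contains_eq_isSome_get?, hg] at hc; simp at hc
      | some v => exact ⟨v, rfl⟩
    have hgetD : d.getD k 0 = v := PySem.Dict.getD_of_get?_eq_some _ _ hv
    have hmem : (k, v) ∈ d.items := PySem.Dict.mem_items_of_get?_eq_some _ hv
    rw [PySem.Dict.items_insert_of_contains _ _ hc, hgetD]
    exact pvSum_replace d.items k v hnd hmem
  · have hgetD : d.getD k 0 = 0 :=
      PySem.Dict.getD_of_not_contains _ _ (by simpa using hc)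
    rw [PySem.Dict.items_insert_of_not_contains _ _ (by simpa using hc), hgetD,
      pvSum_append_singleton]
    unfold pvW
    refine Prod.ext ?_ (Prod.ext ?_ ?_) <;> simp

lemma pvHist_succ (ref seq : List Char) (t : Nat) :
    pvHist ref seq (t + 1)
      = (pvHist ref seq t).insert (PySem.List.pyGetD ref (t : Int) ' ',
          PySem.List.pyGetD seq (t : Int) ' ')
          ((pvHist ref seq t).getD (PySem.List.pyGetD ref (t : Int) ' ',
            PySem.List.pyGetD seq (t : Int) ' ') 0 + 1) := by
  unfold pvHist
  have h : ((t + 1 : Nat) : Int) = (t : Int) + 1 := by push_cast; ring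
  rw [h, PySem.List.pyRange_one_succ_right (by positivity), List.foldl_append]
  rfl

lemma pvHist_nodup (ref seq : List Char) (t : Nat) : (pvHist ref seq t).keys.Nodup := by
  induction t with
  | zero => simp [pvHist, PySem.Dict.keys_empty]
  | succ t ih => rw [pvHist_succ]; exact PySem.Dict.nodup_keys_insert _ _ _ ih


-- the histogram sum equals A's per-position count
lemma pvSum_hist (ref seq : List Char) : ∀ t : Nat,
    pvSum (pvHist ref seq t).items = pvCnt ref seq t := by
  intro t
  induction t with
  | zero => rfl
  | succ t ih =>
    rw [pvHist_succ, pvSum_insert_add_one _ (pvHist_nodup ref seq t), ih, pvCnt_succ]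
    unfold pvStep pvCls
    dsimp only
    split_ifs <;> refine Prod.ext ?_ (Prod.ext ?_ ?_) <;> simp

-- B's per-alignment triple (histogram build + classify) equals pvCnt over the whole reference
lemma pvB_triple (ref seq : List Char) :
    ((pvHist ref seq ref.length).items.foldl (fun (c : Int × Int × Int) kv =>
        if kv.1.2 = 'N' then (c.1, c.2.1, c.2.2 + kv.2)
        else if kv.1.2 = kv.1.1 then (c.1 + kv.2, c.2.1, c.2.2)
        else (c.1, c.2.1 + kv.2, c.2.2)) ((0, 0, 0) : Int × Int × Int))
      = pvCnt ref seq ref.length := by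
  rw [pv_classify_foldl, pvSum_hist]
  refine Prod.ext ?_ (Prod.ext ?_ ?_) <;> simp

-- keys of the mapped items list are the dict's keys
lemma pv_keys_map (ald : PySem.Dict String String) (f : String × String → PySem.Dict String Int) :
    (ald.items.map (fun kv => (kv.1, f kv))).map Prod.fst = ald.keys := by
  simp [PySem.Dict.keys, List.map_map, Function.comp]

lemma pv_mem_keys_foldl {ν : Type} (k : String) :
    ∀ (ps : List (String × ν)) (d : PySem.Dict String ν),
      k ∈ (ps.foldl (fun d x => d.insert x.1 x.2) d).keys → k ∈ d.keys ∨ k ∈ ps.map Prod.fst := by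
  intro ps
  induction ps with
  | nil => intro d h; exact Or.inl h
  | cons p ps ih =>
    intro d h
    rcases ih (d.insert p.1 p.2) h with h1 | h2
    · rcases (PySem.Dict.mem_keys_insert _ _ _ _).mp h1 with h3 | h4
      · exact Or.inr (by simp [h3])
      · exact Or.inl h4
    · exact Or.inr (by simp [h2])

lemma pv_mem_keys_ofList {ν : Type} (ps : List (String × ν)) (k : String)
    (h : k ∈ (PySem.Dict.ofList ps).keys) : k ∈ ps.map Prod.fst := by
  rcases pv_mem_keys_foldl k ps PySem.Dict.empty h with h1 | h2
  · simp [PySem.Dict.keys_empty] at h1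
  · exact h2

lemma pv_items_update_ne_nil {κ ν : Type} [BEq κ] (ps : List (κ × ν)) (d : PySem.Dict κ ν)
    (h : d.items ≠ []) : (d.update ps).items ≠ [] := by
  induction ps generalizing d with
  | nil => exact h
  | cons p ps ih =>
    apply ih
    by_cases hc : d.contains p.1 = true
    · rw [PySem.Dict.items_insert_of_contains _ _ hc]
      simpa using h
    · rw [PySem.Dict.items_insert_of_not_contains _ _ (by simpa using hc)]
      simp

-- A's inner-loop body as a pointwise entry transformer
def pvG (ald : PySem.Dict String String) (ref : List Char) (i : Int) (k : String)
    (d : PySem.Dict String Int) : PySem.Dict String Int :=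
  if PySem.List.pyGetD (ald.getD k "").toList i ' ' = 'N' then
    d.insert "na" (d.getD "na" 0 + 1)
  else if PySem.List.pyGetD (ald.getD k "").toList i ' ' = PySem.List.pyGetD ref i ' ' then
    d.insert "matches" (d.getD "matches" 0 + 1)
  else
    d.insert "mismatches" (d.getD "mismatches" 0 + 1)

lemma pvG_row (ald : PySem.Dict String String) (ref : List Char) (i : Int) (k : String)
    (seq : String) (hseq : ald.getD k "" = seq) (c : Int × Int × Int) :
    pvG ald ref i k (pvRow c) = pvRow (pvStep ref seq.toList i c) := by
  unfold pvG pvStep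
  rw [hseq]
  split_ifs <;>
    simp_all [pvRow_getD_na, pvRow_insert_na, pvRow_getD_matches, pvRow_insert_matches,
      pvRow_getD_mismatches, pvRow_insert_mismatches]

lemma pvA_loop (ald : PySem.Dict String String) (rid : String) (ref : List Char)
    (hnd : ald.keys.Nodup) (hrid : rid ∉ ald.keys) :
    ∀ t : Nat, t ≤ ref.length →
    (PySem.List.pyRange 0 (t : Int) 1).foldl (fun st i =>
      let st := if PySem.List.pyGetD ref i ' ' = 'N'
                then st.insert rid ((st.getD rid PySem.Dict.empty).insert "na"
                       ((st.getD rid PySem.Dict.empty).getD "na" 0 + 1))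
                else st
      ald.keys.foldl (fun st k =>
        let curr := PySem.List.pyGetD (ald.getD k "").toList i ' '
        if curr = 'N' then
          st.insert k ((st.getD k PySem.Dict.empty).insert "na" ((st.getD k PySem.Dict.empty).getD "na" 0 + 1))
        else if curr = PySem.List.pyGetD ref i ' ' then
          st.insert k ((st.getD k PySem.Dict.empty).insert "matches" ((st.getD k PySem.Dict.empty).getD "matches" 0 + 1))
        else
          st.insert k ((st.getD k PySem.Dict.empty).insert "mismatches" ((st.getD k PySem.Dict.empty).getD "mismatches" 0 + 1))) st)
      (pvState ald rid ref 0) = pvState ald rid ref t := by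
  intro t
  induction t with
  | zero => intro _; rfl
  | succ t ih =>
    intro ht
    have ht' : t < ref.length := ht
    have hcast : ((t + 1 : Nat) : Int) = (t : Int) + 1 := by push_cast; ring
    rw [hcast, PySem.List.pyRange_one_succ_right (by positivity), List.foldl_append,
      ih (Nat.le_of_lt ht')]
    have hkeys : (ald.items.map (fun kv => (kv.1, pvRow (pvCnt ref kv.2.toList t)))).map Prod.fst
        = ald.keys := pv_keys_map ald _
    have hLrid : rid ∉ (ald.items.map (fun kv => (kv.1, pvRow (pvCnt ref kv.2.toList t)))).map Prod.fst := by
      rw [hkeys]; exact hrid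
    have hchar : PySem.List.pyGetD ref (t : Int) ' ' = ref[t] := by
      simp [PySem.List.pyGetD_natCast, List.getD_eq_getElem?_getD, List.getElem?_eq_getElem ht']
    have hgetrid : (pvState ald rid ref t).getD rid PySem.Dict.empty
        = PySem.Dict.empty.insert "na" (pvNa (ref.take t)) := by
      rw [show pvState ald rid ref t = PySem.Dict.mk
          ((ald.items.map (fun kv => (kv.1, pvRow (pvCnt ref kv.2.toList t))))
            ++ [(rid, PySem.Dict.empty.insert "na" (pvNa (ref.take t)))]) from rfl,
        pv_getD_mk_append _ _ _ _ hLrid]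
      simp [PySem.Dict.getD, PySem.Dict.get?]
    have hinsrid : ∀ v, (pvState ald rid ref t).insert rid v = PySem.Dict.mk
        ((ald.items.map (fun kv => (kv.1, pvRow (pvCnt ref kv.2.toList t)))) ++ [(rid, v)]) := by
      intro v
      rw [show pvState ald rid ref t = PySem.Dict.mk
          ((ald.items.map (fun kv => (kv.1, pvRow (pvCnt ref kv.2.toList t))))
            ++ [(rid, PySem.Dict.empty.insert "na" (pvNa (ref.take t)))]) from rfl,
        pv_insert_mk_append _ _ _ _ hLrid (by simp [PySem.Dict.contains])]
      congr 1
      rw [PySem.Dict.items_insert_of_contains _ _ (by simp [PySem.Dict.contains])]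
      simp
    have hNa : pvNa (ref.take (t + 1)) = if ref[t] = 'N' then pvNa (ref.take t) + 1
        else pvNa (ref.take t) := by
      have h1 : ref.take (t + 1) = ref.take t ++ [ref[t]] := by
        rw [List.take_add_one]
        simp [List.getElem?_eq_getElem ht']
      rw [h1, pvNa_append_singleton]
    have hstage1 : (if PySem.List.pyGetD ref (t : Int) ' ' = 'N'
          then (pvState ald rid ref t).insert rid
                 (((pvState ald rid ref t).getD rid PySem.Dict.empty).insert "na"
                   (((pvState ald rid ref t).getD rid PySem.Dict.empty).getD "na" 0 + 1))
          else (pvState ald rid ref t))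
        = PySem.Dict.mk ((ald.items.map (fun kv => (kv.1, pvRow (pvCnt ref kv.2.toList t))))
            ++ [(rid, PySem.Dict.empty.insert "na" (pvNa (ref.take (t + 1))))]) := by
      rw [hchar, hNa, hgetrid]
      split_ifs with hN
      · rw [hinsrid]
        rfl
      · rfl
    have hfun : (fun (st : PySem.Dict String (PySem.Dict String Int)) (k : String) =>
        if PySem.List.pyGetD (ald.getD k "").toList (t : Int) ' ' = 'N' then
          st.insert k ((st.getD k PySem.Dict.empty).insert "na" ((st.getD k PySem.Dict.empty).getD "na" 0 + 1))
        else if PySem.List.pyGetD (ald.getD k "").toList (t : Int) ' ' = PySem.List.pyGetD ref (t : Int) ' ' then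
          st.insert k ((st.getD k PySem.Dict.empty).insert "matches" ((st.getD k PySem.Dict.empty).getD "matches" 0 + 1))
        else
          st.insert k ((st.getD k PySem.Dict.empty).insert "mismatches" ((st.getD k PySem.Dict.empty).getD "mismatches" 0 + 1)))
        = (fun st k => st.insert k (pvG ald ref (t : Int) k (st.getD k PySem.Dict.empty))) := by
      funext st k
      unfold pvG
      split_ifs <;> rfl
    simp only [List.foldl_cons, List.foldl_nil]
    rw [hstage1, hfun]
    rw [show PySem.Dict.mk ((ald.items.map (fun kv => (kv.1, pvRow (pvCnt ref kv.2.toList t))))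
          ++ [(rid, PySem.Dict.empty.insert "na" (pvNa (ref.take (t + 1))))])
        = PySem.Dict.mk ([] ++ (ald.items.map (fun kv => (kv.1, pvRow (pvCnt ref kv.2.toList t))))
          ++ [(rid, PySem.Dict.empty.insert "na" (pvNa (ref.take (t + 1))))]) from by simp,
      ← hkeys,
      pv_foldl_pointwise (pvG ald ref (t : Int)) _ [] _
        (by rw [hkeys]; exact hnd)
        (by intro k _ hk; simp at hk)
        (by intro k hk; rw [hkeys] at hk; simp only [List.map_cons, List.map_nil]
            intro hmem
            simp at hmem
            subst hmem
            exact hrid hk)]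
    congr 1
    rw [List.nil_append, List.map_map]
    congr 1
    apply List.map_congr_left
    intro kv hkv
    have hseq : ald.getD kv.1 "" = kv.2 :=
      PySem.Dict.getD_of_mem_items _ hkv hnd _
    simp only [Function.comp]
    rw [pvG_row ald ref (t : Int) kv.1 kv.2 hseq, ← pvCnt_succ]

lemma pvA_value (reference alignments : List (String × String)) (k0 v0 : String)
    (rest : List (String × String))
    (h : (PySem.Dict.ofList reference).items = (k0, v0) :: rest)
    (hrid : k0 ∉ (PySem.Dict.ofList alignments).keys) :
    findStats reference alignments
      = (pvState (PySem.Dict.ofList alignments) k0 v0.toList v0.toList.length).items.map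
          (fun p => (p.1, p.2.items)) := by
  have hnd := PySem.Dict.nodup_keys_ofList alignments
  have hridv : (PySem.List.pyGet? (PySem.Dict.ofList reference).keys 0).getD "" = k0 := by
    rw [show (PySem.Dict.ofList reference).keys
        = k0 :: rest.map Prod.fst from by simp [PySem.Dict.keys, h],
      PySem.List.pyGet?_zero_cons]
    rfl
  have hrefv : (PySem.Dict.ofList reference).getD k0 "" = v0 := by
    simp [PySem.Dict.getD, PySem.Dict.get?, h]
  simp only [findStats]
  rw [hridv, hrefv]
  change ((PySem.List.pyRange 0 ((v0.toList.length : Nat) : Int) 1).foldl (fun st i =>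
      let st := if PySem.List.pyGetD v0.toList i ' ' = 'N'
                then st.insert k0 ((st.getD k0 PySem.Dict.empty).insert "na"
                       ((st.getD k0 PySem.Dict.empty).getD "na" 0 + 1))
                else st
      (PySem.Dict.ofList alignments).keys.foldl (fun st k =>
        let curr := PySem.List.pyGetD ((PySem.Dict.ofList alignments).getD k "").toList i ' '
        if curr = 'N' then
          st.insert k ((st.getD k PySem.Dict.empty).insert "na" ((st.getD k PySem.Dict.empty).getD "na" 0 + 1))
        else if curr = PySem.List.pyGetD v0.toList i ' ' then
          st.insert k ((st.getD k PySem.Dict.empty).insert "matches" ((st.getD k PySem.Dict.empty).getD "matches" 0 + 1))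
        else
          st.insert k ((st.getD k PySem.Dict.empty).insert "mismatches" ((st.getD k PySem.Dict.empty).getD "mismatches" 0 + 1))) st)
      ((((PySem.Dict.ofList alignments).keys.foldl
          (fun st k => st.insert k (pvRow (0, 0, 0))) PySem.Dict.empty)).insert k0
        (PySem.Dict.empty.insert "na" (0 : Int)))).items.map (fun p => (p.1, p.2.items)) = _
  have hinit : (PySem.Dict.ofList alignments).keys.foldl
      (fun st k => st.insert k (pvRow (0, 0, 0))) PySem.Dict.empty
      = PySem.Dict.mk ((PySem.Dict.ofList alignments).items.map
          (fun kv => (kv.1, pvRow (pvCnt v0.toList kv.2.toList 0)))) := by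
    apply PySem.Dict.ext
    refine (PySem.Dict.items_foldl_insert_fresh (PySem.Dict.ofList alignments).keys
      (fun a => a) (fun _ => pvRow (0, 0, 0)) PySem.Dict.empty (by simp) (by simp)).trans ?_
    simp only [PySem.Dict.keys, List.map_map]
    apply List.map_congr_left
    intro kv _
    simp [pvCnt_zero, Function.comp]
  rw [hinit]
  have hins : (PySem.Dict.mk ((PySem.Dict.ofList alignments).items.map
        (fun kv => (kv.1, pvRow (pvCnt v0.toList kv.2.toList 0))))).insert k0
        (PySem.Dict.empty.insert "na" (0 : Int))
      = pvState (PySem.Dict.ofList alignments) k0 v0.toList 0 := by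
    apply PySem.Dict.ext
    rw [PySem.Dict.items_insert_of_not_contains]
    · rfl
    · simp only [PySem.Dict.contains, List.any_eq_false]
      intro p hp
      obtain ⟨kv, hkv, hpk⟩ := List.mem_map.mp hp
      have : p.1 = kv.1 := by rw [← hpk]
      simp only [ne_eq, this]
      intro hco
      apply hrid
      rw [← eq_of_beq hco]
      exact List.mem_map.mpr ⟨kv, hkv, rfl⟩
  rw [hins, pvA_loop (PySem.Dict.ofList alignments) k0 v0.toList hnd hrid
    v0.toList.length (le_refl _)]

lemma pvB_value (reference alignments : List (String × String)) (k0 v0 : String)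
    (rest : List (String × String))
    (h : (PySem.Dict.ofList reference).items = (k0, v0) :: rest)
    (hrid : k0 ∉ (PySem.Dict.ofList alignments).keys) :
    findStats_alt reference alignments
      = (pvState (PySem.Dict.ofList alignments) k0 v0.toList v0.toList.length).items.map
          (fun p => (p.1, p.2.items)) := by
  have hnd := PySem.Dict.nodup_keys_ofList alignments
  simp only [findStats_alt]
  rw [h, PySem.List.pyGet?_zero_cons, Option.getD_some]
  change (((((PySem.Dict.ofList alignments).items.foldl
      (fun st kv => st.insert kv.1 (pvRow
        ((pvHist v0.toList kv.2.toList v0.toList.length).items.foldl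
          (fun (c : Int × Int × Int) kv =>
            if kv.1.2 = 'N' then (c.1, c.2.1, c.2.2 + kv.2)
            else if kv.1.2 = kv.1.1 then (c.1 + kv.2, c.2.1, c.2.2)
            else (c.1, c.2.1 + kv.2, c.2.2)) ((0, 0, 0) : Int × Int × Int))))
      PySem.Dict.empty)).insert k0
      (PySem.Dict.empty.insert "na" (pvNa v0.toList))).items).map (fun p => (p.1, p.2.items)) = _
  have hfoldfun : (fun (st : PySem.Dict String (PySem.Dict String Int)) (kv : String × String) =>
      st.insert kv.1 (pvRow
        ((pvHist v0.toList kv.2.toList v0.toList.length).items.foldl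
          (fun (c : Int × Int × Int) kv =>
            if kv.1.2 = 'N' then (c.1, c.2.1, c.2.2 + kv.2)
            else if kv.1.2 = kv.1.1 then (c.1 + kv.2, c.2.1, c.2.2)
            else (c.1, c.2.1 + kv.2, c.2.2)) ((0, 0, 0) : Int × Int × Int))))
      = (fun st kv => st.insert kv.1 (pvRow (pvCnt v0.toList kv.2.toList v0.toList.length))) := by
    funext st kv
    rw [pvB_triple]
  rw [hfoldfun]
  have hfold : (PySem.Dict.ofList alignments).items.foldl
      (fun st kv => st.insert kv.1 (pvRow (pvCnt v0.toList kv.2.toList v0.toList.length)))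
      PySem.Dict.empty
      = PySem.Dict.mk ((PySem.Dict.ofList alignments).items.map
          (fun kv => (kv.1, pvRow (pvCnt v0.toList kv.2.toList v0.toList.length)))) := by
    apply PySem.Dict.ext
    exact (PySem.Dict.items_foldl_insert_fresh (PySem.Dict.ofList alignments).items
      Prod.fst (fun kv => pvRow (pvCnt v0.toList kv.2.toList v0.toList.length))
      PySem.Dict.empty (by simp) hnd).trans (by simp [PySem.Dict.empty])
  rw [hfold]
  have hins : (PySem.Dict.mk ((PySem.Dict.ofList alignments).items.map
        (fun kv => (kv.1, pvRow (pvCnt v0.toList kv.2.toList v0.toList.length))))).insert k0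
        (PySem.Dict.empty.insert "na" (pvNa v0.toList))
      = pvState (PySem.Dict.ofList alignments) k0 v0.toList v0.toList.length := by
    apply PySem.Dict.ext
    rw [PySem.Dict.items_insert_of_not_contains]
    · simp only [pvState, List.take_length]
    · simp only [PySem.Dict.contains, List.any_eq_false]
      intro p hp
      obtain ⟨kv, hkv, hpk⟩ := List.mem_map.mp hp
      have : p.1 = kv.1 := by rw [← hpk]
      simp only [ne_eq, this]
      intro hco
      apply hrid
      rw [← eq_of_beq hco]
      exact List.mem_map.mpr ⟨kv, hkv, rfl⟩
  rw [hins]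

-- ===== VERDICT (by name: the statement is the Claim_ definition above) =====
theorem findStats_spec : Claim_equal_findStats := by
  intro reference alignments _ hpre
  obtain ⟨h1, h2, _⟩ := hpre
  have hne : (PySem.Dict.ofList reference).items ≠ [] := by
    cases reference with
    | nil => exact absurd rfl h1
    | cons r rest =>
      show ((PySem.Dict.empty.insert r.1 r.2).update rest).items ≠ []
      apply pv_items_update_ne_nil
      simp [PySem.Dict.insert, PySem.Dict.contains, PySem.Dict.empty]
  obtain ⟨⟨k0, v0⟩, rest', hitems⟩ : ∃ p rest', (PySem.Dict.ofList reference).items = p :: rest' := by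
    cases hx : (PySem.Dict.ofList reference).items with
    | nil => exact absurd hx hne
    | cons a b => exact ⟨a, b, rfl⟩
  have hrid : k0 ∉ (PySem.Dict.ofList alignments).keys := by
    intro hk
    obtain ⟨p, hp, hpk⟩ := List.mem_map.mp (pv_mem_keys_ofList alignments k0 hk)
    exact h2 p hp (by rw [hitems]; simpa using hpk)
  show findStats reference alignments = findStats_alt reference alignments
  rw [pvA_value reference alignments k0 v0 rest' hitems hrid,
    pvB_value reference alignments k0 v0 rest' hitems hrid]
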